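-- pv_equiv track=rewrite | github.com/A-Talha/Using-Informed-and-Uninformed-Search-Algorithms-to-Solve-8-Puzzle | Algorithms/Search_Algorithm.py | get_empty_tile_location
-- ===== SOURCE A (Python) =====
-- def get_empty_tile_location(state):
--     count = 8
--     while state:
--         if state % 10 == 0:
--             break
--         state //= 10
--         count -= 1
--     return count // 3, count % 3
-- ===== SOURCE B (Python) =====
-- def get_empty_tile_location(state):
--     # Read the decimal string once: the rightmost '0' (rfind) is the zero tile
--     # A's loop breaks at; padding to 9 cells is the '+ 9 - len(s)' shift.
--     s = str(state)
--     count = s.rfind('0') + 9 - len(s)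
--     return count // 3, count % 3
-- ===== Notes on version B (the rewrite author's own statement) =====
-- stated objective: idiomatic
-- what changed: Replaces the arithmetic digit-peeling while-loop with a single string search: count = str(state).rfind('0') + 9 - len(str(state)), which equals A's counter for every nonnegative state (including states with no zero digit and states longer than 9 digits).
-- outside the precondition, e.g. on get_empty_tile_location(-91): A returns (2, 1), B returns (1, 2); on get_empty_tile_location(-5): A does not finish within the time limit, B returns (2, 0)
import Mathlib
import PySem

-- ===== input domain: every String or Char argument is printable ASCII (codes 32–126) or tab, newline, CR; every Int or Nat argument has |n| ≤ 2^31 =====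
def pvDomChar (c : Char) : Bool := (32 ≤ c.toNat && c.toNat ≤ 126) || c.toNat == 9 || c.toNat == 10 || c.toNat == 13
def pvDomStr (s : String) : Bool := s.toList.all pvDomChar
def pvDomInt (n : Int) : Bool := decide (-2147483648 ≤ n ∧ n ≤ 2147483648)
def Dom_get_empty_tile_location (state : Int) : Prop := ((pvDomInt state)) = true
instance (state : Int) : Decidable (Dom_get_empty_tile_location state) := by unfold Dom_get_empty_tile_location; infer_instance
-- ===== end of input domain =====

-- B replaces A's digit-peeling loop with a single rfind on the decimal string (idiomatic, same cost).

-- ===== PORT A =====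
-- the while-loop of A; fuel only makes it total (64 ≥ any decimal length in Dom), the body is A's
def pvALoop : Nat → Int → Int → Int
  | 0, _, count => count
  | fuel + 1, state, count =>
    if state ≠ 0 then
      if PySem.Int.mod state 10 = 0 then count
      else pvALoop fuel (PySem.Int.floordiv state 10) (count - 1)
    else count

def get_empty_tile_location (state : Int) : Int × Int :=
  let count := pvALoop 64 state 8
  (PySem.Int.floordiv count 3, PySem.Int.mod count 3)

-- ===== PORT B =====
def get_empty_tile_location_alt (state : Int) : Int × Int :=
  let s := PySem.Int.toStr state
  let count := PySem.Str.rfind s "0" + 9 - PySem.Str.len s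
  (PySem.Int.floordiv count 3, PySem.Int.mod count 3)

-- ===== PRECONDITION & SPEC =====
-- Pre_ excludes negative state (outside the 8-puzzle encoding): there A's floor-division peeling
-- diverges for most values (e.g. -5) and where it does break the counter is an accident of the
-- iterates that B's decimal-string reading does not reproduce (e.g. -91).
def Pre_get_empty_tile_location (state : Int) : Prop := 0 ≤ state
instance (state : Int) : Decidable (Pre_get_empty_tile_location state) := by unfold Pre_get_empty_tile_location; infer_instance
def pvWitness_get_empty_tile_location : Int := 123456780

def Spec_get_empty_tile_location (state : Int) (out : Int × Int) : Prop := out = get_empty_tile_location_alt state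
instance (state : Int) (out : Int × Int) : Decidable (Spec_get_empty_tile_location state out) := by unfold Spec_get_empty_tile_location; infer_instance

-- ===== CLAIM (what is proved, stated in full; the proofs are below) =====
def Claim_equal_get_empty_tile_location : Prop := ∀ (state : Int), Dom_get_empty_tile_location state → Pre_get_empty_tile_location state → Spec_get_empty_tile_location state (get_empty_tile_location state)

-- ===== LEMMAS AND PROOFS =====

-- rfind.go on positions below xs.length ignores an appended character
lemma pv_go_append (xs : List Char) (c : Char) :
    ∀ i : Nat, i < xs.length →
      PySem.Chars.rfind.go (xs ++ [c]) ['0'] i = PySem.Chars.rfind.go xs ['0'] i := by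
  intro i
  induction i with
  | zero =>
    intro h
    obtain ⟨a, t, rfl⟩ : ∃ a t, xs = a :: t := by
      cases xs with
      | nil => simp at h
      | cons a t => exact ⟨a, t, rfl⟩
    simp [PySem.Chars.rfind.go, List.isPrefixOf]
  | succ j ih =>
    intro h
    have hd : (xs ++ [c]).drop (j + 1) = xs.drop (j + 1) ++ [c] :=
      List.drop_append_of_le_length (by omega)
    obtain ⟨a, t, ht⟩ : ∃ a t, xs.drop (j + 1) = a :: t := by
      cases hx : xs.drop (j + 1) with
      | nil => exact absurd (List.drop_eq_nil_iff.mp hx) (by omega)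
      | cons a t => exact ⟨a, t, rfl⟩
    simp [PySem.Chars.rfind.go, hd, ht, List.isPrefixOf, ih (by omega)]

-- rfind of '0' over a string with one character appended
lemma pv_rfind_snoc (xs : List Char) (c : Char) :
    PySem.Chars.rfind (xs ++ [c]) ['0'] =
      if c = '0' then (xs.length : Int) else PySem.Chars.rfind xs ['0'] := by
  unfold PySem.Chars.rfind
  have hlen : (xs ++ [c]).length = xs.length + 1 := by simp
  rw [hlen]
  have hdrop : (xs ++ [c]).drop xs.length = [c] := by
    simp [List.drop_append_of_le_length (l₁ := xs) (l₂ := [c]) (i := xs.length) le_rfl]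
  cases hx : xs with
  | nil =>
    subst hx
    simp [PySem.Chars.rfind.go, List.isPrefixOf]
    split_ifs with h1 h2 <;> simp_all [Char.ext_iff]
  | cons a t =>
    subst hx
    -- xs.length = t.length + 1, so both goes start with a step at position length
    have h1 : PySem.Chars.rfind.go ((a :: t) ++ [c]) ['0'] ((a :: t).length + 1) =
        if ['0'].isPrefixOf (((a :: t) ++ [c]).drop ((a :: t).length + 1)) then ((a :: t).length + 1 : Int)
        else PySem.Chars.rfind.go ((a :: t) ++ [c]) ['0'] ((a :: t).length) := by
      simp [PySem.Chars.rfind.go]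
    rw [h1]
    have hempty : ((a :: t) ++ [c]).drop ((a :: t).length + 1) = [] := by
      apply List.drop_eq_nil_iff.mpr; simp
    rw [hempty]
    simp only [List.isPrefixOf]
    have h2 : PySem.Chars.rfind.go ((a :: t) ++ [c]) ['0'] ((a :: t).length) =
        if ['0'].isPrefixOf (((a :: t) ++ [c]).drop ((a :: t).length)) then ((a :: t).length : Int)
        else PySem.Chars.rfind.go ((a :: t) ++ [c]) ['0'] (t.length) := by
      simp [PySem.Chars.rfind.go]
    rw [h2, hdrop]
    have h3 : PySem.Chars.rfind.go (a :: t) ['0'] ((a :: t).length) =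
        if ['0'].isPrefixOf ((a :: t).drop ((a :: t).length)) then ((a :: t).length : Int)
        else PySem.Chars.rfind.go (a :: t) ['0'] (t.length) := by
      simp [PySem.Chars.rfind.go]
    by_cases hc : c = '0'
    · simp [hc, List.isPrefixOf]
    · have hpc : (['0'].isPrefixOf [c]) = false := by
        simp [List.isPrefixOf]; exact fun h => hc (by simpa [Char.ext_iff] using h.symm)
      rw [hpc, if_neg hc]
      simp only [Bool.false_eq_true, if_false]
      rw [h3]
      simp only [List.drop_length, List.isPrefixOf, Bool.false_eq_true, if_false]
      exact pv_go_append (a :: t) c t.length (by simp)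

-- digit characters 1..9 are not '0'
lemma pv_digitChar_ne_zero (d : Nat) (h1 : 1 ≤ d) (h9 : d ≤ 9) : Nat.digitChar d ≠ '0' := by
  interval_cases d <;> decide

-- the heart: A's loop counter as rfind over the decimal digits
lemma pv_loop_spec : ∀ (fuel : Nat) (n : Nat) (c : Int), n < 10 ^ fuel →
    pvALoop fuel ((n : Nat) : Int) c =
      PySem.Chars.rfind (Nat.toDigits 10 n) ['0'] + c + 1 - ((Nat.toDigits 10 n).length : Int) := by
  intro fuel
  induction fuel with
  | zero =>
    intro n c h
    have : n = 0 := by omega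
    subst this
    simp [pvALoop, Nat.toDigits_zero, PySem.Chars.rfind, PySem.Chars.rfind.go, List.isPrefixOf]
  | succ f ih =>
    intro n c h
    by_cases hn : n = 0
    · subst hn
      simp [pvALoop, Nat.toDigits_zero, PySem.Chars.rfind, PySem.Chars.rfind.go, List.isPrefixOf]
    · have hmod : PySem.Int.mod ((n : Nat) : Int) 10 = ((n % 10 : Nat) : Int) :=
        PySem.Int.mod_natCast n 10
      have hdiv : PySem.Int.floordiv ((n : Nat) : Int) 10 = ((n / 10 : Nat) : Int) :=
        PySem.Int.floordiv_natCast n 10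
      by_cases hz : n % 10 = 0
      · -- break: last digit is '0'
        have h10 : 10 ≤ n := by omega
        have hsplit : Nat.toDigits 10 n = Nat.toDigits 10 (n / 10) ++ [Nat.digitChar (n % 10)] := by
          rw [Nat.toDigits_eq_if (by norm_num)]; simp [Nat.not_lt.mpr h10]
        have hA : pvALoop (f + 1) ((n : Nat) : Int) c = c := by
          have hd : (10:Int) ∣ ((n : Nat) : Int) := by
            exact_mod_cast Nat.dvd_of_mod_eq_zero hz
          simp [pvALoop, hn, hd]
        rw [hA, hsplit, hz]
        rw [pv_rfind_snoc, if_pos (by decide)]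
        simp [List.length_append]
      · -- peel a nonzero digit
        have hdig : Nat.digitChar (n % 10) ≠ '0' :=
          pv_digitChar_ne_zero (n % 10) (by omega) (by omega)
        have hA : pvALoop (f + 1) ((n : Nat) : Int) c
            = pvALoop f ((n / 10 : Nat) : Int) (c - 1) := by
          have hnd : ¬ (10:Int) ∣ ((n : Nat) : Int) := by
            intro hd
            have : (10:Nat) ∣ n := by exact_mod_cast hd
            omega
          simp [pvALoop, hn, hnd]
        rw [hA, ih (n / 10) (c - 1) (by
          exact Nat.div_lt_iff_lt_mul (by norm_num : 0 < 10) |>.mpr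
            (by rw [← pow_succ]; exact h))]
        by_cases h10 : n < 10
        · -- single digit, nonzero: toDigits n = [digitChar n], n / 10 = 0
          have hd0 : n / 10 = 0 := Nat.div_eq_of_lt h10
          have hsingle : Nat.toDigits 10 n = [Nat.digitChar n] := Nat.toDigits_of_lt_base h10
          have hmodn : n % 10 = n := Nat.mod_eq_of_lt h10
          have hrf : PySem.Chars.rfind [Nat.digitChar n] ['0'] = -1 := by
            have : Nat.digitChar n ≠ '0' := by rw [← hmodn]; exact hdig
            simp [PySem.Chars.rfind, PySem.Chars.rfind.go, List.isPrefixOf]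
            intro hc; exact absurd (by simpa [Char.ext_iff] using hc.symm) this
          rw [hd0, hsingle, hrf]
          simp [Nat.toDigits_zero, PySem.Chars.rfind, PySem.Chars.rfind.go, List.isPrefixOf]
        · have hsplit : Nat.toDigits 10 n = Nat.toDigits 10 (n / 10) ++ [Nat.digitChar (n % 10)] := by
            rw [Nat.toDigits_eq_if (by norm_num)]; simp [h10]
          rw [hsplit, pv_rfind_snoc]
          simp [hdig]
          ring

theorem pv_counts_agree (state : Int) (h0 : 0 ≤ state) (hub : state ≤ 2147483648) :
    pvALoop 64 state 8 =
      PySem.Str.rfind (PySem.Int.toStr state) "0" + 9 - PySem.Str.len (PySem.Int.toStr state) := by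
  obtain ⟨n, rfl⟩ : ∃ n : Nat, state = (n : Int) := ⟨state.toNat, (Int.toNat_of_nonneg h0).symm⟩
  have hn : n < 10 ^ 64 := by
    have h1 : n ≤ 2147483648 := by exact_mod_cast hub
    calc n ≤ 2147483648 := h1
      _ < 10 ^ 64 := by norm_num
  have hchars : (PySem.Int.toStr ((n : Nat) : Int)).toList = Nat.toDigits 10 n := by
    rw [PySem.Int.toList_toStr]
    simp [PySem.Int.toChars]
  rw [PySem.Str.rfind_eq, PySem.Str.len_eq, hchars]
  have hsub : ("0" : String).toList = ['0'] := by decide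
  rw [hsub, pv_loop_spec 64 n 8 hn]
  ring

-- ===== VERDICT (by name: the statement is the Claim_ definition above) =====
theorem get_empty_tile_location_spec : Claim_equal_get_empty_tile_location := by
  intro state hdom hpre
  unfold Spec_get_empty_tile_location get_empty_tile_location get_empty_tile_location_alt
  have hub : state ≤ 2147483648 := by
    have := of_decide_eq_true hdom
    exact this.2
  rw [pv_counts_agree state hpre hub]
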